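-- pv_equiv track=rewrite | github.com/klmitch/urltree | urltree.py | _path_split
-- ===== SOURCE A (Python) =====
-- def _path_split(path):
--     """
--     Split up a URL path into its component elements.  Repeated slashes
--     are skipped, and no indication is given if there is a trailing
--     slash.  Also, the root element ('/') is not included.
--
--     :param path: The URL path to split.
--
--     :returns: An iterator which iterates over all the elements of the
--               path.
--     """
--
--     # Initialize the state
--     start = None
--     slash = True
--
--     # Walk through the path
--     for idx, char in enumerate(path):
--         if char == '/':
--             if not slash:
--                 # We hit the next slash, so yield the path element and
--                 # reset
--                 yield path[start:idx]
--                 start = None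
--
--                 # Ignore repeated slashes
--                 slash = True
--         elif start is None:
--             # Found the start of a path element
--             start = idx
--             slash = False
--
--     if start is not None:
--         # Make sure to yield the last element
--         yield path[start:]
-- ===== SOURCE B (Python) =====
-- def _path_split(path):
--     """
--     Split up a URL path into its component elements.  (Same contract as A:
--     repeated slashes skipped, no trailing-slash indication, root not
--     included; returns a generator.)
--     """
--
--     # Tokenise once with str.split, then filter out the empty tokens that
--     # leading/trailing/repeated slashes produce.
--     for seg in path.split('/'):
--         if seg:
--             yield seg
-- ===== Notes on version B (the rewrite author's own statement) =====
-- stated objective: idiomatic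
-- what changed: Replaces the char-by-char start-index/slash-flag state machine with a single str.split on the slash separator followed by filtering out empty segments, still as a generator.
import Mathlib
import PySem

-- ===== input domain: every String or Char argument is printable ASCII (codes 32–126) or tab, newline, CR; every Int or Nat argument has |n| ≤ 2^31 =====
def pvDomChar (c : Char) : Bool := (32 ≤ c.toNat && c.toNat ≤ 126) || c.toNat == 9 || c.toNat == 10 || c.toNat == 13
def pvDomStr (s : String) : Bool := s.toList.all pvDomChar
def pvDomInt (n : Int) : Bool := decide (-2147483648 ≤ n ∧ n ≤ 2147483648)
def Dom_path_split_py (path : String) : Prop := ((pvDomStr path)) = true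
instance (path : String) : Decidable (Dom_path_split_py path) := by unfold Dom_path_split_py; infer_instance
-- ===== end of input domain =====

-- B replaces A's char-by-char start-index/slash-flag state machine with str.split on the slash
-- separator + filter of empty segments (idiomatic; both generators; measured faster by a constant factor).


-- ===== PORT A =====
-- state = (start, slash, yielded so far); one loop step of A's `for idx, char in enumerate(path)`
def pvStepA (path : String) (s : Option Int × Bool × List String) (p : Int × Char) :
    Option Int × Bool × List String :=
  if p.2 = '/' then
    if s.2.1 = false then
      -- yield path[start:idx]; start = None; slash = True
      (none, true, s.2.2 ++ [PySem.Str.slice path s.1 (some p.1)])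
    else s
  else if s.1 = none then (some p.1, false, s.2.2)
  else s

-- after the loop: `if start is not None: yield path[start:]`
def pvFinA (path : String) (s : Option Int × Bool × List String) : List String :=
  match s.1 with
  | some _ => s.2.2 ++ [PySem.Str.slice path s.1 none]
  | none => s.2.2

def path_split_py (path : String) : List String :=
  pvFinA path ((PySem.List.enumerate path.toList).foldl (pvStepA path) (none, true, []))

-- ===== PORT B =====
-- Source B's str.split with the single-char slash separator is List.splitOn on the code points;
-- `if seg:` keeps exactly the non-empty segments.
def path_split_py_alt (path : String) : List String :=
  ((path.toList.splitOn '/').map String.ofList).filter (fun seg => seg != "")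

-- ===== PRECONDITION & SPEC =====
def Spec_path_split_py (path : String) (out : List String) : Prop := out = path_split_py_alt path
instance (path : String) (out : List String) : Decidable (Spec_path_split_py path out) := by unfold Spec_path_split_py; infer_instance

-- ===== CLAIM (what is proved, stated in full; the proofs are below) =====
def Claim_equal_path_split_py : Prop := ∀ (path : String), Dom_path_split_py path → Spec_path_split_py path (path_split_py path)

-- ===== LEMMAS AND PROOFS =====

-- canonical segment list: current in-progress segment `cur`, then the rest of the chars
def pvSegs (cur : List Char) : List Char → List (List Char)
  | [] => if cur = [] then [] else [cur]
  | c :: r => if c = '/' then (if cur = [] then pvSegs [] r else cur :: pvSegs [] r)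
              else pvSegs (cur ++ [c]) r

lemma pvEnumerate_cons {α : Type} (x : α) (t : List α) (i : Int) :
    PySem.List.enumerate (x :: t) i = (i, x) :: PySem.List.enumerate t (i + 1) := rfl

lemma pvSlice_take (path : String) (st i : Nat) :
    PySem.Str.slice path (some (st : Int)) (some (i : Int)) =
      String.ofList ((path.toList.drop st).take (i - st)) := by
  have h := PySem.Str.toList_slice path (some (st : Int)) (some (i : Int))
  rw [PySem.Chars.slice_eq_listSlice, PySem.List.slice_natCast] at h
  calc PySem.Str.slice path (some (st : Int)) (some (i : Int))
      = String.ofList (PySem.Str.slice path (some (st : Int)) (some (i : Int))).toList := by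
        rw [String.ofList_toList]
    _ = _ := by rw [h]

lemma pvSlice_drop (path : String) (st : Nat) :
    PySem.Str.slice path (some (st : Int)) none = String.ofList (path.toList.drop st) := by
  have h := PySem.Str.toList_slice path (some (st : Int)) none
  rw [PySem.Chars.slice_eq_listSlice, PySem.List.slice_from_natCast] at h
  calc PySem.Str.slice path (some (st : Int)) none
      = String.ofList (PySem.Str.slice path (some (st : Int)) none).toList := by
        rw [String.ofList_toList]
    _ = _ := by rw [h]

-- invariant of A's loop, phrased against pvSegs
lemma pvLoopA (path : String) (r : List Char) :
    ∀ (i : Nat) (start : Option Nat) (acc : List String),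
      path.toList.drop i = r → i ≤ path.toList.length →
      (∀ st, start = some st → st < i) →
      pvFinA path ((PySem.List.enumerate r (i : Int)).foldl (pvStepA path)
          ((match start with | none => (none : Option Int) | some st => some (st : Int)),
            start.isNone, acc)) =
        acc ++ (pvSegs (match start with
                        | none => []
                        | some st => (path.toList.drop st).take (i - st)) r).map String.ofList := by
  induction r with
  | nil =>
    intro i start acc hdrop hlen hst
    have hi : i = path.toList.length := by
      have := List.drop_eq_nil_iff.mp hdrop
      omega
    cases start with
    | none => simp [PySem.List.enumerate, pvFinA, pvSegs]
    | some st =>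
      have hlt : st < i := hst st rfl
      have htake : (path.toList.drop st).take (i - st) = path.toList.drop st := by
        apply List.take_of_length_le
        rw [List.length_drop]
        omega
      have hne : path.toList.drop st ≠ [] := by
        intro h
        have := List.drop_eq_nil_iff.mp h
        omega
      simp only [PySem.List.enumerate, List.foldl_nil, Option.isNone_some,
        pvFinA, pvSegs, htake]
      rw [pvSlice_drop, if_neg hne]
      simp
  | cons c r ih =>
    intro i start acc hdrop hlen hst
    have hlen' : i < path.toList.length := by
      have h1 : (path.toList.drop i).length = path.toList.length - i := List.length_drop ..
      rw [hdrop] at h1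
      simp only [List.length_cons] at h1
      omega
    have hdrop' : path.toList.drop (i + 1) = r := by
      have h2 : List.drop 1 (List.drop i path.toList) = List.drop (i + 1) path.toList :=
        List.drop_drop
      rw [← h2, hdrop]
      rfl
    rw [pvEnumerate_cons, List.foldl_cons]
    have hcast : ((i : Int) + 1) = ((i + 1 : Nat) : Int) := by push_cast; ring
    by_cases hc : c = '/'
    · subst hc
      cases start with
      | none =>
        -- slash is True: skip the repeated slash
        simp only [pvStepA, Option.isNone_none, reduceIte, Bool.true_eq_false, if_false]
        have hIH := ih (i + 1) none acc hdrop' (by omega) (by simp)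
        simp only [Option.isNone_none] at hIH
        rw [hcast, hIH]
        simp [pvSegs]
      | some st =>
        -- end of a segment: yield path[st:i]
        have hlt : st < i := hst st rfl
        simp only [pvStepA, Option.isNone_some, reduceIte]
        have hIH := ih (i + 1) none
          (acc ++ [PySem.Str.slice path (some (st : Int)) (some (i : Int))]) hdrop'
          (by omega) (by simp)
        simp only [Option.isNone_none] at hIH
        rw [hcast, hIH]
        have hne : (path.toList.drop st).take (i - st) ≠ [] := by
          intro h
          have h2 := congrArg List.length h
          rw [List.length_take, List.length_drop] at h2
          simp only [List.length_nil] at h2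
          omega
        rw [pvSlice_take]
        simp [pvSegs, hne]
    · cases start with
      | none =>
        -- start of a new segment at index i
        simp only [pvStepA, Option.isNone_none]
        rw [if_neg hc]
        simp only [reduceIte]
        have hIH := ih (i + 1) (some i) acc hdrop' (by omega)
          (by intro st h; cases h; omega)
        simp only [Option.isNone_some] at hIH
        rw [hcast, hIH]
        have hcur : (path.toList.drop i).take (i + 1 - i) = [c] := by
          rw [hdrop]
          simp
        rw [hcur]
        simp [pvSegs, hc]
      | some st =>
        -- inside a segment: state unchanged, current segment grows by c
        have hlt : st < i := hst st rfl
        simp only [pvStepA, Option.isNone_some]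
        rw [if_neg hc]
        simp only [reduceCtorEq, reduceIte]
        have hIH := ih (i + 1) (some st) acc hdrop' (by omega)
          (by intro st' h; cases h; omega)
        simp only [Option.isNone_some] at hIH
        rw [hcast, hIH]
        have hget : path.toList[i]? = some c := by
          have h3 : (path.toList.drop i)[0]? = some c := by rw [hdrop]; rfl
          rw [List.getElem?_drop] at h3
          simpa using h3
        have hext : (path.toList.drop st).take (i + 1 - st) =
            (path.toList.drop st).take (i - st) ++ [c] := by
          have h1 : i + 1 - st = (i - st) + 1 := by omega
          rw [h1, List.take_add_one]
          congr 1
          have h4 : (path.toList.drop st)[i - st]? = path.toList[st + (i - st)]? :=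
            List.getElem?_drop ..
          rw [h4, show st + (i - st) = i by omega, hget]
          rfl
        rw [hext]
        simp [pvSegs, hc]

lemma pvModifyHead_nil (l : List (List Char)) :
    l.modifyHead (fun h => ([] : List Char) ++ h) = l := by
  cases l <;> simp

-- pvSegs is splitOnP-then-filter (with the pending segment prepended to the head)
lemma pvSegs_splitOnP (r : List Char) :
    ∀ cur : List Char,
      ((List.splitOnP (fun c => c == '/') r).modifyHead (fun h => cur ++ h)).filter
          (fun l => !l.isEmpty) = pvSegs cur r := by
  induction r with
  | nil =>
    intro cur
    by_cases h : cur = [] <;> simp [List.splitOnP_nil, pvSegs, h]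
  | cons c r ih =>
    intro cur
    rw [List.splitOnP_cons]
    by_cases hc : c = '/'
    · have h0 := ih ([] : List Char)
      rw [pvModifyHead_nil] at h0
      by_cases h : cur = [] <;>
        simp [hc, pvSegs, h, ← h0]
    · cases hS : List.splitOnP (fun c => c == '/') r with
      | nil =>
        have hIH := ih (cur ++ [c])
        rw [hS] at hIH
        simp only [if_neg (by simp [hc] : ¬ (c == '/') = true)]
        simp only [List.modifyHead] at hIH ⊢
        simp [pvSegs, hc, ← hIH]
      | cons h t =>
        have hIH := ih (cur ++ [c])
        rw [hS] at hIH
        simp only [if_neg (by simp [hc] : ¬ (c == '/') = true)]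
        simp only [List.modifyHead] at hIH ⊢
        rw [show cur ++ c :: h = (cur ++ [c]) ++ h by simp]
        rw [hIH]
        simp [pvSegs, hc]

lemma pvOfList_ne_empty (l : List Char) : (String.ofList l != "") = !l.isEmpty := by
  cases l with
  | nil => rfl
  | cons c t =>
    simp only [List.isEmpty_cons, Bool.not_false, bne_iff_ne, ne_eq]
    intro h
    have := congrArg String.toList h
    simp at this

-- ===== VERDICT (by name: the statement is the Claim_ definition above) =====
theorem path_split_py_spec : Claim_equal_path_split_py := by
  intro path _
  unfold Spec_path_split_py path_split_py path_split_py_alt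
  have hA := pvLoopA path path.toList 0 none [] (by simp) (by omega) (by simp)
  rw [show ((0:Nat) : Int) = 0 by rfl] at hA
  simp only [Option.isNone_none] at hA
  rw [hA]
  have hB := pvSegs_splitOnP path.toList ([] : List Char)
  rw [pvModifyHead_nil] at hB
  rw [List.splitOn]
  rw [List.filter_map]
  have hcong : ∀ l : List (List Char),
      l.filter ((fun seg => seg != "") ∘ String.ofList) = l.filter (fun l => !l.isEmpty) := by
    intro l
    apply List.filter_congr
    intro x _
    exact pvOfList_ne_empty x
  rw [hcong, hB]
  simp
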